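-- pv_equiv track=rewrite | github.com/yangjing6688/framework | ExtremeAutomation/Apis/NetworkElement/GeneratedApis/ParseApis/CLI/filemanagement/EXOS/base/baseversion/baseunit/FilemanagementCustomShowTools.py | check_config_file_exists_per_slot
-- ===== SOURCE A (Python) =====
-- def check_config_file_exists_per_slot(output, args, **kwargs):
--     formats = [".conf", ".cfg", ".config"]
--
--     config_files = []
--     for filename in output.split():
--         for ending in formats:
--             if ending in filename:
--                 config_files.append(filename)
--
--     for config_file in config_files:
--         if args["config"] == config_file:
--             return True, True
--     return False, False
-- ===== SOURCE B (Python) =====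
-- def check_config_file_exists_per_slot(output, args, **kwargs):
--     formats = [".conf", ".cfg", ".config"]
--     config = args.get("config")
--     found = config in output.split() and any(ending in config for ending in formats)
--     return found, found
-- ===== Notes on version B (the rewrite author's own statement) =====
-- stated objective: simpler
-- what changed: Instead of filtering every word of the output into an intermediate config_files list and then scanning that list against args['config'], B looks up the config name once (args.get) and computes a single membership-and-extension test: config in output.split() and some extension in config.
import Mathlib
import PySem

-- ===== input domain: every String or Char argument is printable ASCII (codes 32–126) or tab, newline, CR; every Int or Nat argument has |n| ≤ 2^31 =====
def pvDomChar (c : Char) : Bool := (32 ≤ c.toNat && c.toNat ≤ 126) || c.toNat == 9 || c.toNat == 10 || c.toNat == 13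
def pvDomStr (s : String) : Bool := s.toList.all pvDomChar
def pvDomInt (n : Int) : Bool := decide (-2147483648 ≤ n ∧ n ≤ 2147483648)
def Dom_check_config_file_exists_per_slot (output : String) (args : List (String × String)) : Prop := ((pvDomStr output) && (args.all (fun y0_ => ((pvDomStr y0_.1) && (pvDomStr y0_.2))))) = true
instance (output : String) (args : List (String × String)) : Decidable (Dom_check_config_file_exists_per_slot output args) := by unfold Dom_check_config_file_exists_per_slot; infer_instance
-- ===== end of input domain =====

-- ===== PORT A =====
-- B is a simpler one-pass membership test; A filters words into a list, then scans it.
-- A-side helper: the two nested 'for' loops building config_files, as a fold.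
def pvCollect (output : String) : List String :=
  (PySem.Str.split₀ output).foldl
    (fun acc filename =>
      [".conf", ".cfg", ".config"].foldl
        (fun acc2 ending => if PySem.Str.isIn ending filename then acc2 ++ [filename] else acc2)
        acc)
    []

-- A-side helper: the final loop with its early return; args["config"] (KeyError inputs are
-- excluded by Pre_, so the default "" is never the looked-up value when the loop runs).
def pvFindCfg (args : List (String × String)) : List String → Bool × Bool
  | [] => (false, false)
  | cf :: rest =>
      if ((args.lookup "config").getD "") == cf then (true, true) else pvFindCfg args rest

def check_config_file_exists_per_slot (output : String) (args : List (String × String)) : Bool × Bool :=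
  pvFindCfg args (pvCollect output)

-- ===== PORT B =====
def check_config_file_exists_per_slot_alt (output : String) (args : List (String × String)) : Bool × Bool :=
  let found :=
    match args.lookup "config" with
    | some config =>
        (PySem.Str.split₀ output).contains config
          && [".conf", ".cfg", ".config"].any (fun ending => PySem.Str.isIn ending config)
    | none => false   -- config is None: never equal to a word of output.split()
  (found, found)

-- ===== PRECONDITION & SPEC =====
-- Pre_ excludes exactly the inputs on which A raises KeyError: args has no "config" key while
-- some whitespace-separated word of output contains one of the three extensions.
def Pre_check_config_file_exists_per_slot (output : String) (args : List (String × String)) : Prop :=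
  (args.lookup "config").isSome = true ∨
    ∀ w ∈ PySem.Str.split₀ output, ([".conf", ".cfg", ".config"].any (fun e => PySem.Str.isIn e w)) = false
instance (output : String) (args : List (String × String)) : Decidable (Pre_check_config_file_exists_per_slot output args) := by unfold Pre_check_config_file_exists_per_slot; infer_instance

def pvWitness_check_config_file_exists_per_slot : String × (List (String × String)) :=
  ("primary.cfg backup.conf notes.txt", [("config", "backup.conf")])

def Spec_check_config_file_exists_per_slot (output : String) (args : List (String × String)) (out : Bool × Bool) : Prop := out = check_config_file_exists_per_slot_alt output args
instance (output : String) (args : List (String × String)) (out : Bool × Bool) : Decidable (Spec_check_config_file_exists_per_slot output args out) := by unfold Spec_check_config_file_exists_per_slot; infer_instance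

-- ===== CLAIM (what is proved, stated in full; the proofs are below) =====
def Claim_equal_check_config_file_exists_per_slot : Prop := ∀ (output : String) (args : List (String × String)), Dom_check_config_file_exists_per_slot output args → Pre_check_config_file_exists_per_slot output args → Spec_check_config_file_exists_per_slot output args (check_config_file_exists_per_slot output args)

-- ===== LEMMAS AND PROOFS =====
-- Membership after the inner 'for ending in formats' loop of A.
theorem mem_inner (fn x : String) (acc : List String) :
    (x ∈ [".conf", ".cfg", ".config"].foldl
        (fun acc2 ending => if PySem.Str.isIn ending fn then acc2 ++ [fn] else acc2) acc)
    ↔ x ∈ acc ∨ (x = fn ∧ ([".conf", ".cfg", ".config"].any (fun e => PySem.Str.isIn e fn)) = true) := by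
  simp only [List.foldl, List.any_cons, List.any_nil, Bool.or_eq_true]
  split_ifs <;> simp_all

-- Membership in A's collected list: a word of output that contains one of the extensions.
theorem mem_pvCollect (output : String) (x : String) :
    x ∈ pvCollect output ↔
      x ∈ PySem.Str.split₀ output ∧ ([".conf", ".cfg", ".config"].any (fun e => PySem.Str.isIn e x)) = true := by
  unfold pvCollect
  suffices h : ∀ (ws : List String) (acc : List String),
      x ∈ ws.foldl (fun acc filename =>
        [".conf", ".cfg", ".config"].foldl
          (fun acc2 ending => if PySem.Str.isIn ending filename then acc2 ++ [filename] else acc2) acc) acc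
      ↔ x ∈ acc ∨ (x ∈ ws ∧ ([".conf", ".cfg", ".config"].any (fun e => PySem.Str.isIn e x)) = true) by
    simpa using h (PySem.Str.split₀ output) []
  intro ws
  induction ws with
  | nil => intro acc; simp
  | cons w rest ih =>
      intro acc
      rw [List.foldl_cons, ih, mem_inner, List.mem_cons]
      constructor
      · rintro ((h | ⟨rfl, hP⟩) | ⟨hx, hP⟩)
        · exact Or.inl h
        · exact Or.inr ⟨Or.inl rfl, hP⟩
        · exact Or.inr ⟨Or.inr hx, hP⟩
      · rintro (h | ⟨(rfl | hx), hP⟩)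
        · exact Or.inl (Or.inl h)
        · exact Or.inl (Or.inr ⟨rfl, hP⟩)
        · exact Or.inr ⟨hx, hP⟩

theorem pvFindCfg_eq_contains (args : List (String × String)) (l : List String) :
    pvFindCfg args l = (l.contains ((args.lookup "config").getD ""), l.contains ((args.lookup "config").getD "")) := by
  induction l with
  | nil => simp [pvFindCfg]
  | cons cf rest ih =>
      by_cases h : ((args.lookup "config").getD "") = cf
      · simp [pvFindCfg, h]
      · simp [pvFindCfg, h, ih]

-- ===== VERDICT (by name: the statement is the Claim_ definition above) =====
theorem check_config_file_exists_per_slot_spec : Claim_equal_check_config_file_exists_per_slot := by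
  intro output args _ hpre
  unfold Spec_check_config_file_exists_per_slot check_config_file_exists_per_slot check_config_file_exists_per_slot_alt
  rw [pvFindCfg_eq_contains]
  cases hc : args.lookup "config" with
  | some config =>
      have hb : (pvCollect output).contains config
          = ((PySem.Str.split₀ output).contains config
              && [".conf", ".cfg", ".config"].any (fun ending => PySem.Str.isIn ending config)) := by
        rw [Bool.eq_iff_iff]
        simp only [List.contains_iff_mem, Bool.and_eq_true, mem_pvCollect, List.contains_iff_mem]
      simpa using hb
  | none =>
      have hempty : pvCollect output = [] := by
        rcases hpre with hpre | hpre
        · rw [hc] at hpre; simp at hpre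
        · refine List.eq_nil_iff_forall_not_mem.2 (fun x hx => ?_)
          rw [mem_pvCollect] at hx
          rw [hpre x hx.1] at hx
          exact Bool.false_ne_true hx.2
      simp [hempty]
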